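-- pv_equiv track=rewrite | github.com/cirosantilli/project-euler-solvers | solvers/450.py | build_prefix
-- ===== SOURCE A (Python) =====
-- def build_prefix(mu: list[int]) -> tuple[list[int], list[int], list[int], list[int]]:
--     """
--     Build prefix sums:
--       pref_mu[i]      = Σ_{k<=i} μ(k)
--       pref_mui[i]     = Σ_{k<=i} μ(k)*k
--       pref_mu_odd[i]  = Σ_{k<=i, k odd} μ(k)
--       pref_mui_odd[i] = Σ_{k<=i, k odd} μ(k)*k
--     """
--     n = len(mu) - 1
--     pref_mu = [0] * (n + 1)
--     pref_mui = [0] * (n + 1)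
--     pref_mu_odd = [0] * (n + 1)
--     pref_mui_odd = [0] * (n + 1)
--
--     s0 = s1 = so0 = so1 = 0
--     for i in range(1, n + 1):
--         mi = mu[i]
--         s0 += mi
--         s1 += mi * i
--         if i & 1:
--             so0 += mi
--             so1 += mi * i
--         pref_mu[i] = s0
--         pref_mui[i] = s1
--         pref_mu_odd[i] = so0
--         pref_mui_odd[i] = so1
--     return pref_mu, pref_mui, pref_mu_odd, pref_mui_odd
-- ===== SOURCE B (Python) =====
-- def _accum(xs):
--     out = []
--     s = 0
--     for x in xs:
--         s += x
--         out.append(s)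
--     return out
--
--
-- def build_prefix(mu: list[int]) -> tuple[list[int], list[int], list[int], list[int]]:
--     if not mu:
--         return [], [], [], []
--     vals = [0] + mu[1:]
--     pref_mu = _accum(vals)
--     pref_mui = _accum([v * i for i, v in enumerate(vals)])
--     pref_mu_odd = _accum([v if i % 2 else 0 for i, v in enumerate(vals)])
--     pref_mui_odd = _accum([v * i if i % 2 else 0 for i, v in enumerate(vals)])
--     return pref_mu, pref_mui, pref_mu_odd, pref_mui_odd
-- ===== Notes on version B (the rewrite author's own statement) =====
-- stated objective: simpler
-- what changed: B replaces A's single fused loop that maintains four running sums and writes into four pre-allocated arrays by four independent cumulative sums of masked/weighted sequences built from enumerate, via one small _accum helper.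
import Mathlib
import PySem

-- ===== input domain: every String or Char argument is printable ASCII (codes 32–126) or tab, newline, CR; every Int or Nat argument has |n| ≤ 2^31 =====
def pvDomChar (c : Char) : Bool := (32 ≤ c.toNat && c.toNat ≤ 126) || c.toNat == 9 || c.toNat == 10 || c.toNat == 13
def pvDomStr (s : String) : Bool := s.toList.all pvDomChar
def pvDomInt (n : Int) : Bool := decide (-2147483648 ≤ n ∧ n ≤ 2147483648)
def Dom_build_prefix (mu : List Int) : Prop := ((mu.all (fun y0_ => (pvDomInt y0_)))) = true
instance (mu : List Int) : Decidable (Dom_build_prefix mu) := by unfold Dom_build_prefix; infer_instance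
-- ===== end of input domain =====

-- B builds the four prefix arrays independently (masked sequences + a cumulative-sum helper)
-- instead of A's single fused loop writing running sums into four pre-allocated arrays.

-- ===== PORT A =====
-- body of A's fused loop, named so the invariant lemma below can speak about it
def pvStepA (mu : List Int)
    (st : List Int × List Int × List Int × List Int × Int × Int × Int × Int) (i : Int) :
    List Int × List Int × List Int × List Int × Int × Int × Int × Int :=
  match st with
  | (p0, p1, p2, p3, s0, s1, so0, so1) =>
    let mi := PySem.List.pyGetD mu i 0      -- mu[i]; i is always in range here, so exact
    let s0 := s0 + mi
    let s1 := s1 + mi * i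
    -- 'if i & 1': i ≥ 1 here, so 'i & 1' is exactly 'i % 2'
    let (so0, so1) := if i % 2 == 1 then (so0 + mi, so1 + mi * i) else (so0, so1)
    (p0.set i.toNat s0, p1.set i.toNat s1, p2.set i.toNat so0, p3.set i.toNat so1,
     s0, s1, so0, so1)

-- literal port of A: pre-allocate four zero arrays, one fused loop over range(1, n+1)
-- maintaining four running sums, writing each array slot in place.
def build_prefix (mu : List Int) : List Int × List Int × List Int × List Int :=
  let n : Int := PySem.List.len mu - 1
  let pref_mu : List Int := List.replicate (n + 1).toNat 0       -- [0] * (n+1)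
  let pref_mui : List Int := List.replicate (n + 1).toNat 0
  let pref_mu_odd : List Int := List.replicate (n + 1).toNat 0
  let pref_mui_odd : List Int := List.replicate (n + 1).toNat 0
  let st := (PySem.List.pyRange 1 (n + 1) 1).foldl (pvStepA mu)
    (pref_mu, pref_mui, pref_mu_odd, pref_mui_odd, 0, 0, 0, 0)
  (st.1, st.2.1, st.2.2.1, st.2.2.2.1)

-- ===== PORT B =====
-- cumulative sums: the 'out.append(s)' loop of Source B's _accum
def pvAccum (xs : List Int) : List Int :=
  (xs.foldl (fun (acc : List Int × Int) x => (acc.1 ++ [acc.2 + x], acc.2 + x)) ([], 0)).1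

def build_prefix_alt (mu : List Int) : List Int × List Int × List Int × List Int :=
  if mu = [] then ([], [], [], []) else
  let vals : List Int := 0 :: mu.drop 1          -- [0] + mu[1:]
  let e := PySem.List.enumerate vals
  (pvAccum vals,
   pvAccum (e.map (fun p => p.2 * p.1)),
   -- 'v if i % 2 else 0': enumerate indices are ≥ 0, so truthiness of i % 2 is i % 2 == 1
   pvAccum (e.map (fun p => if p.1 % 2 == 1 then p.2 else 0)),
   pvAccum (e.map (fun p => if p.1 % 2 == 1 then p.2 * p.1 else 0)))

-- ===== PRECONDITION & SPEC =====
def Spec_build_prefix (mu : List Int) (out : List Int × List Int × List Int × List Int) : Prop := out = build_prefix_alt mu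
instance (mu : List Int) (out : List Int × List Int × List Int × List Int) : Decidable (Spec_build_prefix mu out) := by unfold Spec_build_prefix; infer_instance

-- ===== CLAIM (what is proved, stated in full; the proofs are below) =====
def Claim_equal_build_prefix : Prop := ∀ (mu : List Int), Dom_build_prefix mu → Spec_build_prefix mu (build_prefix mu)

-- ===== LEMMAS AND PROOFS =====

/-- index-aware prefix sums: the entry for element x at index i adds `f i x` to the running sum. -/
def prefW (f : Nat → Int → Int) : List Int → Nat → Int → List Int
  | [], _, _ => []
  | x :: xs, i, s => (s + f i x) :: prefW f xs (i + 1) (s + f i x)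

/-- plain prefix sums with start accumulator s. -/
def prefS : List Int → Int → List Int
  | [], _ => []
  | x :: xs, s => (s + x) :: prefS xs (s + x)

def pvF0 : Nat → Int → Int := fun _ x => x
def pvF1 : Nat → Int → Int := fun k x => x * (k : Int)
def pvF2 : Nat → Int → Int := fun k x => if k % 2 == 1 then x else 0
def pvF3 : Nat → Int → Int := fun k x => if k % 2 == 1 then x * (k : Int) else 0

theorem prefW_congr (f g : Nat → Int → Int) (h : ∀ k x, f k x = g k x) :
    ∀ (xs : List Int) (i : Nat) (s : Int), prefW f xs i s = prefW g xs i s := by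
  intro xs
  induction xs with
  | nil => intro i s; rfl
  | cons x xs ih => intro i s; simp only [prefW, h, ih]

theorem prefS_eq_prefW (xs : List Int) : ∀ (i : Nat) (s : Int), prefS xs s = prefW pvF0 xs i s := by
  induction xs with
  | nil => intro i s; rfl
  | cons x xs ih =>
    intro i s
    simp only [prefS, prefW, pvF0]
    rw [ih (i + 1) (s + x)]

theorem foldl_accum (xs : List Int) (acc : List Int) (s : Int) :
    (xs.foldl (fun (a : List Int × Int) x => (a.1 ++ [a.2 + x], a.2 + x)) (acc, s)).1
      = acc ++ prefS xs s := by
  induction xs generalizing acc s with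
  | nil => simp [prefS]
  | cons x xs ih => simp [prefS, ih]

theorem pvAccum_eq (xs : List Int) : pvAccum xs = prefS xs 0 := by
  simpa using foldl_accum xs [] 0

theorem prefS_map_enum (g : Int × Int → Int) (f : Nat → Int → Int)
    (hg : ∀ (i : Nat) (x : Int), g ((i : Int), x) = f i x) :
    ∀ (xs : List Int) (i : Nat) (s : Int),
      prefS ((PySem.List.enumerate xs (i : Int)).map g) s = prefW f xs i s := by
  intro xs
  induction xs with
  | nil => intro i s; simp [PySem.List.enumerate_nil, prefS, prefW]
  | cons x xs ih =>
    intro i s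
    rw [PySem.List.enumerate_cons]
    have hc : ((i : Int) + 1) = ((i + 1 : Nat) : Int) := by push_cast; ring
    simp only [List.map_cons, prefS, prefW, hg, hc, ih]

theorem pvParity (k : Nat) : (((k : Int)) % 2 == 1) = ((k % 2 : Nat) == 1) := by
  rcases Nat.even_or_odd k with he | ho
  · have h2 : k % 2 = 0 := Nat.even_iff.mp he
    have h2' : (k : Int) % 2 = 0 := by omega
    simp [h2, h2']
  · have h2 : k % 2 = 1 := Nat.odd_iff.mp ho
    have h2' : (k : Int) % 2 = 1 := by omega
    simp [h2, h2']

theorem take_set_succ {l : List Int} {i : Nat} (v : Int) (h : i < l.length) :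
    (l.set i v).take (i + 1) = l.take i ++ [v] := by
  rw [List.take_add_one, List.take_set_of_le (Nat.le_refl i)]
  simp [h]

/-- invariant of A's fused loop: after processing indices i .. i+c-1 the four arrays are
    their untouched first i slots followed by index-aware prefix sums of mu.drop i. -/
theorem A_loop (mu : List Int) :
    ∀ (c i : Nat) (p0 p1 p2 p3 : List Int) (s0 s1 so0 so1 : Int),
      p0.length = i + c → p1.length = i + c → p2.length = i + c → p3.length = i + c →
      mu.length = i + c →
      ((PySem.List.pyRange (i : Int) ((i : Int) + (c : Int)) 1).foldl (pvStepA mu)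
          (p0, p1, p2, p3, s0, s1, so0, so1)).1
          = p0.take i ++ prefW pvF0 (mu.drop i) i s0
      ∧ ((PySem.List.pyRange (i : Int) ((i : Int) + (c : Int)) 1).foldl (pvStepA mu)
          (p0, p1, p2, p3, s0, s1, so0, so1)).2.1
          = p1.take i ++ prefW pvF1 (mu.drop i) i s1
      ∧ ((PySem.List.pyRange (i : Int) ((i : Int) + (c : Int)) 1).foldl (pvStepA mu)
          (p0, p1, p2, p3, s0, s1, so0, so1)).2.2.1
          = p2.take i ++ prefW pvF2 (mu.drop i) i so0
      ∧ ((PySem.List.pyRange (i : Int) ((i : Int) + (c : Int)) 1).foldl (pvStepA mu)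
          (p0, p1, p2, p3, s0, s1, so0, so1)).2.2.2.1
          = p3.take i ++ prefW pvF3 (mu.drop i) i so1 := by
  intro c
  induction c with
  | zero =>
    intro i p0 p1 p2 p3 s0 s1 so0 so1 h0 h1 h2 h3 hm
    rw [PySem.List.pyRange_one_eq_nil (by omega)]
    refine ⟨?_, ?_, ?_, ?_⟩ <;>
      simp [List.drop_of_length_le (by omega : mu.length ≤ i), prefW,
            List.take_of_length_le (by omega : p0.length ≤ i),
            List.take_of_length_le (by omega : p1.length ≤ i),
            List.take_of_length_le (by omega : p2.length ≤ i),
            List.take_of_length_le (by omega : p3.length ≤ i)]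
  | succ c ih =>
    intro i p0 p1 p2 p3 s0 s1 so0 so1 h0 h1 h2 h3 hm
    have hi : i < mu.length := by omega
    rw [PySem.List.pyRange_one_cons (by push_cast; omega), List.foldl_cons]
    rw [show ((i : Int) + 1) = ((i + 1 : Nat) : Int) by push_cast; ring,
        show ((i : Int) + ((c + 1 : Nat) : Int)) = (((i + 1 : Nat) : Int) + (c : Int)) by
          push_cast; ring]
    have hgd : PySem.List.pyGetD mu (i : Int) 0 = mu[i] := by
      rw [PySem.List.pyGetD_natCast]; exact List.getD_eq_getElem _ _ hi
    have hdrop : mu.drop i = mu[i] :: mu.drop (i + 1) := List.drop_eq_getElem_cons hi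
    by_cases hpar : i % 2 = 1
    · have hip : (((i : Int)) % 2 == 1) = true := by rw [pvParity]; simp [hpar]
      simp only [pvStepA, hgd, hip, if_true, Int.toNat_natCast]
      obtain ⟨e0, e1, e2, e3⟩ := ih (i + 1)
        (p0.set i (s0 + mu[i])) (p1.set i (s1 + mu[i] * ↑i))
        (p2.set i (so0 + mu[i])) (p3.set i (so1 + mu[i] * ↑i))
        (s0 + mu[i]) (s1 + mu[i] * ↑i) (so0 + mu[i]) (so1 + mu[i] * ↑i)
        (by simp; omega) (by simp; omega) (by simp; omega) (by simp; omega) (by omega)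
      rw [e0, e1, e2, e3,
          take_set_succ _ (by omega), take_set_succ _ (by omega),
          take_set_succ _ (by omega), take_set_succ _ (by omega), hdrop]
      simp [prefW, pvF0, pvF1, pvF2, pvF3, hpar]
    · have hip : (((i : Int)) % 2 == 1) = false := by rw [pvParity]; simp [hpar]
      simp only [pvStepA, hgd, hip, Bool.false_eq_true, if_false, Int.toNat_natCast]
      obtain ⟨e0, e1, e2, e3⟩ := ih (i + 1)
        (p0.set i (s0 + mu[i])) (p1.set i (s1 + mu[i] * ↑i))
        (p2.set i so0) (p3.set i so1)
        (s0 + mu[i]) (s1 + mu[i] * ↑i) so0 so1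
        (by simp; omega) (by simp; omega) (by simp; omega) (by simp; omega) (by omega)
      rw [e0, e1, e2, e3,
          take_set_succ _ (by omega), take_set_succ _ (by omega),
          take_set_succ _ (by omega), take_set_succ _ (by omega), hdrop]
      simp [prefW, pvF0, pvF1, pvF2, pvF3, hpar]

-- ===== VERDICT (by name: the statement is the Claim_ definition above) =====
theorem build_prefix_spec : Claim_equal_build_prefix := by
  intro mu _
  unfold Spec_build_prefix
  cases mu with
  | nil => decide
  | cons x t =>
    simp only [build_prefix, build_prefix_alt, PySem.List.len_eq, List.length_cons,
               if_neg (List.cons_ne_nil x t), List.drop_one, List.tail_cons]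
    rw [show ((t.length + 1 : Nat) : Int) - 1 + 1 = (1 : Int) + (t.length : Int) by
          push_cast; ring]
    rw [show ((1 : Int) + (t.length : Int)).toNat = 1 + t.length by
          rw [show (1 : Int) + (t.length : Int) = ((1 + t.length : Nat) : Int) by push_cast; ring,
              Int.toNat_natCast]]
    rw [show List.replicate (1 + t.length) (0 : Int) = 0 :: List.replicate t.length 0 by
          rw [Nat.add_comm, List.replicate_succ]]
    obtain ⟨e0, e1, e2, e3⟩ := A_loop (x :: t) t.length 1
      (0 :: List.replicate t.length 0) (0 :: List.replicate t.length 0)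
      (0 :: List.replicate t.length 0) (0 :: List.replicate t.length 0) 0 0 0 0
      (by simp; omega) (by simp; omega) (by simp; omega) (by simp; omega)
      (by simp; omega)
    rw [show ((0 :: List.replicate t.length (0:Int)).take 1) = [0] from rfl,
        show ((x :: t).drop 1) = t from rfl, Int.natCast_one] at e0 e1 e2 e3
    rw [e0, e1, e2, e3]
    simp only [Prod.mk.injEq]
    refine ⟨?_, ?_, ?_, ?_⟩
    · rw [pvAccum_eq]
      simp only [prefS]
      norm_num
      rw [prefS_eq_prefW t 1]
    · rw [pvAccum_eq, PySem.List.enumerate_cons]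
      simp only [List.map_cons, prefS]
      norm_num
      rw [← Int.natCast_one,
          prefS_map_enum (fun p => p.2 * p.1) pvF1 (fun _ _ => rfl) t 1 0]
    · rw [pvAccum_eq, PySem.List.enumerate_cons]
      simp only [List.map_cons, prefS]
      norm_num
      rw [← Int.natCast_one,
          prefS_map_enum (fun p => if p.1 % 2 = ((1 : Nat) : Int) then p.2 else 0)
            (fun k x => if ((k : Int)) % 2 = ((1 : Nat) : Int) then x else 0) (fun _ _ => rfl) t 1 0]
      exact (prefW_congr (fun k x => if ((k : Int)) % 2 = ((1 : Nat) : Int) then x else 0) pvF2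
        (fun k x => by
            rcases Nat.even_or_odd k with he | ho
            · have h2 : k % 2 = 0 := Nat.even_iff.mp he
              have h2' : (k : Int) % 2 = 0 := by omega
              simp [pvF2, h2, h2']
            · have h2 : k % 2 = 1 := Nat.odd_iff.mp ho
              have h2' : (k : Int) % 2 = 1 := by omega
              simp [pvF2, h2, h2']) t 1 0).symm
    · rw [pvAccum_eq, PySem.List.enumerate_cons]
      simp only [List.map_cons, prefS]
      norm_num
      rw [← Int.natCast_one,
          prefS_map_enum (fun p => if p.1 % 2 = ((1 : Nat) : Int) then p.2 * p.1 else 0)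
            (fun k x => if ((k : Int)) % 2 = ((1 : Nat) : Int) then x * (k : Int) else 0) (fun _ _ => rfl) t 1 0]
      exact (prefW_congr (fun k x => if ((k : Int)) % 2 = ((1 : Nat) : Int) then x * (k : Int) else 0) pvF3
        (fun k x => by
            rcases Nat.even_or_odd k with he | ho
            · have h2 : k % 2 = 0 := Nat.even_iff.mp he
              have h2' : (k : Int) % 2 = 0 := by omega
              simp [pvF3, h2, h2']
            · have h2 : k % 2 = 1 := Nat.odd_iff.mp ho
              have h2' : (k : Int) % 2 = 1 := by omega
              simp [pvF3, h2, h2']) t 1 0).symm
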